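-- pv_equiv track=rewrite | github.com/SetsuoK/frail_test | feedback_engine.py | score_kcl
-- ===== SOURCE A (Python) =====
-- from typing import Dict, List, Optional, Tuple, Any
--
-- def score_kcl(kcl: Dict[int, int]) -> Dict[str, int]:
--     total_25 = sum(kcl.get(i, 0) for i in range(1, 26))
--     total_20 = sum(kcl.get(i, 0) for i in range(1, 21))
--     iadl = sum(kcl.get(i, 0) for i in range(1, 6))
--     undou = sum(kcl.get(i, 0) for i in range(6, 11))
--     eiyou = sum(kcl.get(i, 0) for i in (11, 12))
--     kouku = sum(kcl.get(i, 0) for i in (13, 14, 15))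
--     hikikomo = sum(kcl.get(i, 0) for i in (16, 17))
--     ninchi = sum(kcl.get(i, 0) for i in (18, 19, 20))
--     utsu = sum(kcl.get(i, 0) for i in range(21, 26))
--     return {"総合点":total_25,"20項目":total_20,"IADL":iadl,"運動器":undou,"低栄養":eiyou,"口腔":kouku,"閉じこもり":hikikomo,"認知":ninchi,"抑うつ":utsu}
-- ===== SOURCE B (Python) =====
-- def score_kcl(kcl):
--     iadl = undou = eiyou = kouku = hikikomo = ninchi = utsu = 0
--     for k, v in kcl.items():
--         if k < 1 or k > 25:
--             continue
--         if k <= 5: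
--             iadl += v
--         elif k <= 10:
--             undou += v
--         elif k <= 12:
--             eiyou += v
--         elif k <= 15:
--             kouku += v
--         elif k <= 17:
--             hikikomo += v
--         elif k <= 20:
--             ninchi += v
--         else:
--             utsu += v
--     total_20 = iadl + undou + eiyou + kouku + hikikomo + ninchi
--     total_25 = total_20 + utsu
--     return {"総合点": total_25, "20項目": total_20, "IADL": iadl, "運動器": undou,
--             "低栄養": eiyou, "口腔": kouku, "閉じこもり": hikikomo, "認知": ninchi, "抑うつ": utsu}
-- ===== Notes on version B (the rewrite author's own statement) =====
-- stated objective: alternative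
-- what changed: B makes a single pass over the dict items, classifying each key into its band with an if/elif chain and accumulating seven counters, then derives the 20-item and 25-item totals by adding the band sums; A instead performs nine keyed range scans (70 dict lookups) over fixed index ranges, re-scanning the overlapping ranges 1-20 and 1-25. Pre_ excludes association lists with duplicate keys, which cannot arise from a Python dict (A's input type).
import Mathlib
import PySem

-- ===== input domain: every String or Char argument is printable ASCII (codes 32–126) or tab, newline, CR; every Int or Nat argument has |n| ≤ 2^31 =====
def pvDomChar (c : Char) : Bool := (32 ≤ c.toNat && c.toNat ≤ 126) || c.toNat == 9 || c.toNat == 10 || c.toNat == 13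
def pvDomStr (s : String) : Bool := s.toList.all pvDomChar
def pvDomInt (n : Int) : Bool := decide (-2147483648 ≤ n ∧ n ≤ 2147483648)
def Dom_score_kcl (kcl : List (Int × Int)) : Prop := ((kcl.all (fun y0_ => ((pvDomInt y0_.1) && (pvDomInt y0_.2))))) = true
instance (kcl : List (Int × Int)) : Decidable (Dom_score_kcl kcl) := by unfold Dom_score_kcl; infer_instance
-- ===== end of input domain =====

-- B replaces A's nine keyed range scans (70 dict lookups, overlapping ranges re-scanned) by ONE pass
-- over the dict's items that classifies each key into its band, deriving the totals by aggregation.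

-- ===== PORT A =====
def pvGetSum (kcl : List (Int × Int)) (idx : List Int) : Int :=
  (idx.map (fun i => PySem.Dict.getD (PySem.Dict.mk kcl) i 0)).sum

def score_kcl (kcl : List (Int × Int)) : List (String × Int) :=
  let total_25 := pvGetSum kcl (PySem.List.pyRange 1 26 1)
  let total_20 := pvGetSum kcl (PySem.List.pyRange 1 21 1)
  let iadl := pvGetSum kcl (PySem.List.pyRange 1 6 1)
  let undou := pvGetSum kcl (PySem.List.pyRange 6 11 1)
  let eiyou := pvGetSum kcl [11, 12]
  let kouku := pvGetSum kcl [13, 14, 15]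
  let hikikomo := pvGetSum kcl [16, 17]
  let ninchi := pvGetSum kcl [18, 19, 20]
  let utsu := pvGetSum kcl (PySem.List.pyRange 21 26 1)
  [("総合点", total_25), ("20項目", total_20), ("IADL", iadl), ("運動器", undou),
   ("低栄養", eiyou), ("口腔", kouku), ("閉じこもり", hikikomo), ("認知", ninchi), ("抑うつ", utsu)]

-- ===== PORT B =====
structure PvAcc where
  iadl : Int
  undou : Int
  eiyou : Int
  kouku : Int
  hikikomo : Int
  ninchi : Int
  utsu : Int
deriving Repr, DecidableEq

-- the body of B's single 'for k, v in kcl.items()' loop (if/elif chain on the key)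
def pvStep (a : PvAcc) (p : Int × Int) : PvAcc :=
  if p.1 < 1 ∨ 25 < p.1 then a
  else if p.1 ≤ 5 then { a with iadl := a.iadl + p.2 }
  else if p.1 ≤ 10 then { a with undou := a.undou + p.2 }
  else if p.1 ≤ 12 then { a with eiyou := a.eiyou + p.2 }
  else if p.1 ≤ 15 then { a with kouku := a.kouku + p.2 }
  else if p.1 ≤ 17 then { a with hikikomo := a.hikikomo + p.2 }
  else if p.1 ≤ 20 then { a with ninchi := a.ninchi + p.2 }
  else { a with utsu := a.utsu + p.2 }

def score_kcl_alt (kcl : List (Int × Int)) : List (String × Int) :=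
  let a := (PySem.Dict.mk kcl).items.foldl pvStep ⟨0, 0, 0, 0, 0, 0, 0⟩
  let total_20 := a.iadl + a.undou + a.eiyou + a.kouku + a.hikikomo + a.ninchi
  let total_25 := total_20 + a.utsu
  [("総合点", total_25), ("20項目", total_20), ("IADL", a.iadl), ("運動器", a.undou),
   ("低栄養", a.eiyou), ("口腔", a.kouku), ("閉じこもり", a.hikikomo), ("認知", a.ninchi), ("抑うつ", a.utsu)]

-- ===== PRECONDITION & SPEC =====
-- Pre_ excludes association lists with duplicate keys: a Python dict (A's input type) never has
-- duplicate keys, so such lists represent no input A is ever called on.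
def Pre_score_kcl (kcl : List (Int × Int)) : Prop := (kcl.map Prod.fst).Nodup
instance (kcl : List (Int × Int)) : Decidable (Pre_score_kcl kcl) := by unfold Pre_score_kcl; infer_instance
def pvWitness_score_kcl : (List (Int × Int)) := [(1, 3), (6, -2), (21, 5)]

def Spec_score_kcl (kcl : List (Int × Int)) (out : List (String × Int)) : Prop := out = score_kcl_alt kcl
instance (kcl : List (Int × Int)) (out : List (String × Int)) : Decidable (Spec_score_kcl kcl out) := by unfold Spec_score_kcl; infer_instance

-- ===== CLAIM (what is proved, stated in full; the proofs are below) =====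
def Claim_equal_score_kcl : Prop := ∀ (kcl : List (Int × Int)), Dom_score_kcl kcl → Pre_score_kcl kcl → Spec_score_kcl kcl (score_kcl kcl)

-- ===== LEMMAS AND PROOFS =====

-- band contribution of one item (proof-side characterisation of pvStep)
def pvBand (lo hi : Int) (p : Int × Int) : Int := if lo ≤ p.1 ∧ p.1 ≤ hi then p.2 else 0

set_option maxHeartbeats 1000000 in
theorem pvStep_char (a : PvAcc) (p : Int × Int) :
    pvStep a p = ⟨a.iadl + pvBand 1 5 p, a.undou + pvBand 6 10 p, a.eiyou + pvBand 11 12 p,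
      a.kouku + pvBand 13 15 p, a.hikikomo + pvBand 16 17 p, a.ninchi + pvBand 18 20 p,
      a.utsu + pvBand 21 25 p⟩ := by
  rcases a with ⟨i, u, e, k, h, n, t⟩
  simp only [pvStep, pvBand]
  by_cases h1 : p.1 < 1 ∨ 25 < p.1
  · rw [if_pos h1]
    simp only [PvAcc.mk.injEq]
    refine ⟨?_, ?_, ?_, ?_, ?_, ?_, ?_⟩ <;> (first | rw [if_pos (by omega)] | rw [if_neg (by omega)]) <;> ring
  · rw [if_neg h1]
    by_cases h2 : p.1 ≤ 5
    · rw [if_pos h2]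
      simp only [PvAcc.mk.injEq]
      refine ⟨?_, ?_, ?_, ?_, ?_, ?_, ?_⟩ <;> (first | rw [if_pos (by omega)] | rw [if_neg (by omega)]) <;> ring
    · rw [if_neg h2]
      by_cases h3 : p.1 ≤ 10
      · rw [if_pos h3]
        simp only [PvAcc.mk.injEq]
        refine ⟨?_, ?_, ?_, ?_, ?_, ?_, ?_⟩ <;> (first | rw [if_pos (by omega)] | rw [if_neg (by omega)]) <;> ring
      · rw [if_neg h3]
        by_cases h4 : p.1 ≤ 12
        · rw [if_pos h4]
          simp only [PvAcc.mk.injEq]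
          refine ⟨?_, ?_, ?_, ?_, ?_, ?_, ?_⟩ <;> (first | rw [if_pos (by omega)] | rw [if_neg (by omega)]) <;> ring
        · rw [if_neg h4]
          by_cases h5 : p.1 ≤ 15
          · rw [if_pos h5]
            simp only [PvAcc.mk.injEq]
            refine ⟨?_, ?_, ?_, ?_, ?_, ?_, ?_⟩ <;> (first | rw [if_pos (by omega)] | rw [if_neg (by omega)]) <;> ring
          · rw [if_neg h5]
            by_cases h6 : p.1 ≤ 17
            · rw [if_pos h6]
              simp only [PvAcc.mk.injEq]
              refine ⟨?_, ?_, ?_, ?_, ?_, ?_, ?_⟩ <;> (first | rw [if_pos (by omega)] | rw [if_neg (by omega)]) <;> ring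
            · rw [if_neg h6]
              by_cases h7 : p.1 ≤ 20
              · rw [if_pos h7]
                simp only [PvAcc.mk.injEq]
                refine ⟨?_, ?_, ?_, ?_, ?_, ?_, ?_⟩ <;> (first | rw [if_pos (by omega)] | rw [if_neg (by omega)]) <;> ring
              · rw [if_neg h7]
                simp only [PvAcc.mk.injEq]
                refine ⟨?_, ?_, ?_, ?_, ?_, ?_, ?_⟩ <;> (first | rw [if_pos (by omega)] | rw [if_neg (by omega)]) <;> ring

theorem pvFold_char (l : List (Int × Int)) (a : PvAcc) :
    l.foldl pvStep a = ⟨a.iadl + (l.map (pvBand 1 5)).sum, a.undou + (l.map (pvBand 6 10)).sum,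
      a.eiyou + (l.map (pvBand 11 12)).sum, a.kouku + (l.map (pvBand 13 15)).sum,
      a.hikikomo + (l.map (pvBand 16 17)).sum, a.ninchi + (l.map (pvBand 18 20)).sum,
      a.utsu + (l.map (pvBand 21 25)).sum⟩ := by
  induction l generalizing a with
  | nil => simp only [List.foldl_nil, List.map_nil, List.sum_nil, add_zero]
  | cons p t ih =>
    rw [List.foldl_cons, pvStep_char, ih]
    simp only [List.map_cons, List.sum_cons, PvAcc.mk.injEq]
    refine ⟨?_, ?_, ?_, ?_, ?_, ?_, ?_⟩ <;> ring

theorem pvGetD_mk_cons (k v : Int) (rest : List (Int × Int)) (i : Int) :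
    PySem.Dict.getD (PySem.Dict.mk ((k, v) :: rest)) i 0
      = if k = i then v else PySem.Dict.getD (PySem.Dict.mk rest) i 0 := by
  rw [PySem.Dict.getD_eq_get?_getD, PySem.Dict.get?_mk_cons]
  by_cases h : k = i <;> simp [h, PySem.Dict.getD_eq_get?_getD]

theorem pvGetD_not_mem (rest : List (Int × Int)) (k : Int) (h : k ∉ rest.map Prod.fst) :
    PySem.Dict.getD (PySem.Dict.mk rest) k 0 = 0 := by
  induction rest with
  | nil => simp [PySem.Dict.getD_eq_get?_getD, PySem.Dict.get?]
  | cons p t ih =>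
    rcases p with ⟨k', v'⟩
    simp only [List.map_cons, List.mem_cons] at h
    rw [pvGetD_mk_cons]
    have hk : k' ≠ k := fun hkk => h (Or.inl hkk.symm)
    rw [if_neg hk]
    exact ih (fun hm => h (Or.inr hm))

theorem pvSum_if_cons (idx : List Int) (hidx : idx.Nodup) (k v : Int) (g : Int → Int) :
    (idx.map (fun i => if k = i then v else g i)).sum
      = (if k ∈ idx then v - g k else 0) + (idx.map g).sum := by
  induction idx with
  | nil => simp
  | cons j t ih =>
    simp only [List.nodup_cons] at hidx
    by_cases h : k = j
    · subst h
      have hmap : t.map (fun i => if k = i then v else g i) = t.map g := by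
        apply List.map_congr_left
        intro i hi
        have hne : k ≠ i := fun he => hidx.1 (by rw [he]; exact hi)
        exact if_neg hne
      simp [hmap]
      ring
    · simp [h, ih hidx.2]
      split_ifs <;> ring

theorem pvSum_eq (kcl : List (Int × Int)) (hn : (kcl.map Prod.fst).Nodup)
    (idx : List Int) (hidx : idx.Nodup) :
    pvGetSum kcl idx = (kcl.map (fun p => if p.1 ∈ idx then p.2 else 0)).sum := by
  induction kcl with
  | nil =>
    simp [pvGetSum, PySem.Dict.getD_eq_get?_getD, PySem.Dict.get?]
  | cons p rest ih =>
    rcases p with ⟨k, v⟩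
    simp only [List.map_cons, List.nodup_cons] at hn
    unfold pvGetSum
    simp only [pvGetD_mk_cons]
    rw [pvSum_if_cons idx hidx k v _, pvGetD_not_mem rest k hn.1]
    rw [List.map_cons, List.sum_cons]
    rw [← ih hn.2]
    unfold pvGetSum
    split_ifs <;> ring

theorem pvR_1_26 : PySem.List.pyRange 1 26 1 = [1,2,3,4,5,6,7,8,9,10,11,12,13,14,15,16,17,18,19,20,21,22,23,24,25] := by decide
theorem pvR_1_21 : PySem.List.pyRange 1 21 1 = [1,2,3,4,5,6,7,8,9,10,11,12,13,14,15,16,17,18,19,20] := by decide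
theorem pvR_1_6 : PySem.List.pyRange 1 6 1 = [1,2,3,4,5] := by decide
theorem pvR_6_11 : PySem.List.pyRange 6 11 1 = [6,7,8,9,10] := by decide
theorem pvR_21_26 : PySem.List.pyRange 21 26 1 = [21,22,23,24,25] := by decide

-- concrete index list ↔ band, lifting the if through the map
theorem pvMem_band (lo hi : Int) (idx : List Int) (hmem : ∀ i : Int, i ∈ idx ↔ lo ≤ i ∧ i ≤ hi)
    (kcl : List (Int × Int)) :
    (kcl.map (fun p => if p.1 ∈ idx then p.2 else 0)).sum = (kcl.map (pvBand lo hi)).sum := by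
  congr 1
  exact List.map_congr_left (fun p _ => by simp only [pvBand, hmem])

-- adjacent bands split a band, summed over the list
theorem pvBand_split (l : List (Int × Int)) (lo mid mid' hi : Int)
    (h1 : lo ≤ mid) (h2 : mid < hi) (h3 : mid' = mid + 1) :
    (l.map (pvBand lo hi)).sum = (l.map (pvBand lo mid)).sum + (l.map (pvBand mid' hi)).sum := by
  subst h3
  induction l with
  | nil => simp
  | cons p t ih =>
    simp only [List.map_cons, List.sum_cons]
    rw [ih]
    unfold pvBand
    split_ifs <;> omega

-- ===== VERDICT (by name: the statement is the Claim_ definition above) =====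
set_option maxHeartbeats 1000000 in
theorem score_kcl_spec : Claim_equal_score_kcl := by
  intro kcl _ hpre
  unfold Spec_score_kcl score_kcl score_kcl_alt
  rw [pvR_1_26, pvR_1_21, pvR_1_6, pvR_6_11, pvR_21_26]
  rw [pvSum_eq kcl hpre _ (by decide), pvSum_eq kcl hpre _ (by decide),
      pvSum_eq kcl hpre _ (by decide), pvSum_eq kcl hpre _ (by decide),
      pvSum_eq kcl hpre _ (by decide), pvSum_eq kcl hpre _ (by decide),
      pvSum_eq kcl hpre _ (by decide), pvSum_eq kcl hpre _ (by decide),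
      pvSum_eq kcl hpre _ (by decide)]
  rw [pvMem_band 1 25 _ (by intro i; simp; omega) kcl,
      pvMem_band 1 20 _ (by intro i; simp; omega) kcl,
      pvMem_band 1 5 _ (by intro i; simp; omega) kcl,
      pvMem_band 6 10 _ (by intro i; simp; omega) kcl,
      pvMem_band 11 12 _ (by intro i; simp; omega) kcl,
      pvMem_band 13 15 _ (by intro i; simp; omega) kcl,
      pvMem_band 16 17 _ (by intro i; simp; omega) kcl,
      pvMem_band 18 20 _ (by intro i; simp; omega) kcl,
      pvMem_band 21 25 _ (by intro i; simp; omega) kcl]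
  have hitems : (PySem.Dict.mk kcl).items = kcl := rfl
  rw [hitems, pvFold_char,
      pvBand_split kcl 1 20 21 25 (by norm_num) (by norm_num) (by norm_num),
      pvBand_split kcl 1 5 6 20 (by norm_num) (by norm_num) (by norm_num),
      pvBand_split kcl 6 10 11 20 (by norm_num) (by norm_num) (by norm_num),
      pvBand_split kcl 11 12 13 20 (by norm_num) (by norm_num) (by norm_num),
      pvBand_split kcl 13 15 16 20 (by norm_num) (by norm_num) (by norm_num),
      pvBand_split kcl 16 17 18 20 (by norm_num) (by norm_num) (by norm_num)]
  simp only [List.cons.injEq, Prod.mk.injEq, true_and, and_true, zero_add]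
  omega
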